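-- pv_equiv track=rewrite | github.com/marrcusviniciuss/validationtool | core/id_generator.py | _build_alpha_run_lengths
-- ===== SOURCE A (Python) =====
-- def _build_alpha_run_lengths(value: str) -> list[int]:
--     lengths = [0] * len(value)
--     if not value:
--         return lengths
--     start = 0
--     while start < len(value):
--         if not value[start].isalpha():
--             start += 1
--             continue
--         end = start + 1
--         while end < len(value) and value[end].isalpha():
--             end += 1
--         run_length = end - start
--         left_fixed = start == 0 or not value[start - 1].isalnum()
--         right_fixed = end == len(value) or not value[end].isalnum()
--         if left_fixed or right_fixed:
--             for index in range(start, end):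
--                 lengths[index] = run_length
--         start = end
--     return lengths
-- ===== SOURCE B (Python) =====
-- def _build_alpha_run_lengths(value: str) -> list[int]:
--     n = len(value)
--     alpha = [c.isalpha() for c in value]
--     L = [0] * n  # L[i]: length of alpha run ending at i
--     for i in range(n):
--         if alpha[i]:
--             L[i] = (L[i - 1] + 1) if i else 1
--     R = [0] * n  # R[i]: length of alpha run starting at i
--     for i in range(n - 1, -1, -1):
--         if alpha[i]:
--             R[i] = (R[i + 1] + 1) if i + 1 < n else 1
--
--     def cell(i: int) -> int:
--         if not alpha[i]:
--             return 0
--         s = i - L[i] + 1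
--         e = i + R[i]
--         if s == 0 or not value[s - 1].isalnum() or e == n or not value[e].isalnum():
--             return L[i] + R[i] - 1
--         return 0
--
--     return [cell(i) for i in range(n)]
-- ===== Notes on version B (the rewrite author's own statement) =====
-- stated objective: alternative
-- what changed: B replaces A's run-by-run scan (find each maximal alpha run, then write its length into a range) by per-index dynamic programming: two staged passes build prefix and suffix alpha run-length arrays L and R, and each output cell is computed independently from L[i], R[i] and the boundary characters.
import Mathlib
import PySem

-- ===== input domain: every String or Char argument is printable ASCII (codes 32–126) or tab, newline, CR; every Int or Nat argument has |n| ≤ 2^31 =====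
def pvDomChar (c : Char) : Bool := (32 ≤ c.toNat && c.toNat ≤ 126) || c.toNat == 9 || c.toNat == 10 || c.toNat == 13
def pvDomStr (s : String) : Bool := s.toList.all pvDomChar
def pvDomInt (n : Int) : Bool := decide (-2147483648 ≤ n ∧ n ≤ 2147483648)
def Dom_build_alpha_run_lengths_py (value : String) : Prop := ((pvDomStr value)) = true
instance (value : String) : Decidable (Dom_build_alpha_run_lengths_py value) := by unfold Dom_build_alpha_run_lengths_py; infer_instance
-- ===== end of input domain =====

-- B computes each output cell independently by per-index dynamic programming
-- (prefix/suffix alpha run-length arrays L and R) instead of A's run-by-run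
-- scan writing each run's length into a range; same cost, different algorithm.

-- ===== PORT A =====
-- inner 'while end < len(value) and value[end].isalpha(): end += 1'
-- (the getD default is never read: the bound check guards the access, as in Python)
def pvAScan (v : List Char) (e : Nat) : Nat :=
  if e < v.length ∧ PySem.Chars.isalpha (v.getD e ' ') = true then pvAScan v (e + 1) else e
termination_by v.length - e
decreasing_by omega

theorem pvAScan_le_self (v : List Char) (e : Nat) : e ≤ pvAScan v e := by
  rw [pvAScan]
  split
  · exact le_trans (by omega) (pvAScan_le_self v (e + 1))
  · exact le_refl e
termination_by v.length - e
decreasing_by omega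

-- 'for index in range(start, end): lengths[index] = run_length'
def pvSetRange (l : List Int) (r : Int) (s e : Nat) : List Int :=
  if s < e then pvSetRange (l.set s r) r (s + 1) e else l
termination_by e - s

def pvALoop (v : List Char) (lengths : List Int) (start : Nat) : List Int :=
  if hs : start < v.length then
    if PySem.Chars.isalpha (v.getD start ' ') = false then pvALoop v lengths (start + 1)
    else
      let e := pvAScan v (start + 1)
      let run : Int := ((e - start : Nat) : Int)
      let leftF := start == 0 || ! PySem.Chars.isalnum (v.getD (start - 1) ' ')
      let rightF := e == v.length || ! PySem.Chars.isalnum (v.getD e ' ')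
      let lengths' := if leftF || rightF then pvSetRange lengths run start e else lengths
      pvALoop v lengths' e
  else lengths
termination_by v.length - start
decreasing_by
  · omega
  · have := pvAScan_le_self v (start + 1); omega

def build_alpha_run_lengths_py (value : String) : List Int :=
  let v := value.toList
  let lengths := List.replicate v.length (0 : Int)
  if v = [] then lengths else pvALoop v lengths 0

-- ===== PORT B =====
-- forward pass 'for i in range(n): if alpha[i]: L[i] = (L[i-1]+1) if i else 1'
-- as the obvious structural recursion carrying the previous cell's value
def pvMkL : List Bool → Nat → List Nat
  | [], _ => []
  | a :: rest, prev =>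
    let cur := if a then prev + 1 else 0
    cur :: pvMkL rest cur

-- backward pass 'for i in range(n-1,-1,-1): if alpha[i]: R[i] = (R[i+1]+1) if i+1<n else 1'
-- as the obvious recursion from the right (head of the tail result = R[i+1])
def pvMkR : List Bool → List Nat
  | [] => []
  | a :: rest =>
    let r := pvMkR rest
    (if a then r.headD 0 + 1 else 0) :: r

-- 'def cell(i)' ; 'i - L[i] + 1' is written 'i + 1 - L[i]' (equal over ℤ, and L[i] ≤ i+1)
def pvCell (v : List Char) (alpha : List Bool) (ll rr : List Nat) (i : Nat) : Int :=
  if alpha.getD i false then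
    let li := ll.getD i 0
    let ri := rr.getD i 0
    let s := i + 1 - li
    let e := i + ri
    if s == 0 || ! PySem.Chars.isalnum (v.getD (s - 1) ' ')
        || e == v.length || ! PySem.Chars.isalnum (v.getD e ' ')
    then ((li + ri - 1 : Nat) : Int) else 0
  else 0

def build_alpha_run_lengths_py_alt (value : String) : List Int :=
  let v := value.toList
  let alpha := v.map PySem.Chars.isalpha
  let ll := pvMkL alpha 0
  let rr := pvMkR alpha
  (List.range v.length).map (pvCell v alpha ll rr)

-- ===== PRECONDITION & SPEC =====
def Spec_build_alpha_run_lengths_py (value : String) (out : List Int) : Prop := out = build_alpha_run_lengths_py_alt value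
instance (value : String) (out : List Int) : Decidable (Spec_build_alpha_run_lengths_py value out) := by unfold Spec_build_alpha_run_lengths_py; infer_instance

-- ===== CLAIM (what is proved, stated in full; the proofs are below) =====
def Claim_equal_build_alpha_run_lengths_py : Prop := ∀ (value : String), Dom_build_alpha_run_lengths_py value → Spec_build_alpha_run_lengths_py value (build_alpha_run_lengths_py value)

-- ===== LEMMAS AND PROOFS =====

theorem pvAScan_le_len (v : List Char) (e : Nat) (h : e ≤ v.length) : pvAScan v e ≤ v.length := by
  rw [pvAScan]
  split
  · next hc => exact pvAScan_le_len v (e + 1) (by omega)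
  · exact h
termination_by v.length - e
decreasing_by omega

theorem pvAScan_alpha (v : List Char) (e j : Nat) (h1 : e ≤ j) (h2 : j < pvAScan v e) :
    PySem.Chars.isalpha (v.getD j ' ') = true := by
  rw [pvAScan] at h2
  split at h2
  · next hc =>
    by_cases hj : j = e
    · subst hj; exact hc.2
    · exact pvAScan_alpha v (e + 1) j (by omega) h2
  · omega
termination_by v.length - e
decreasing_by omega

theorem pvAScan_end (v : List Char) (e : Nat) (h : e ≤ v.length) :
    pvAScan v e = v.length ∨ PySem.Chars.isalpha (v.getD (pvAScan v e) ' ') = false := by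
  rw [pvAScan]
  split
  · next hc => exact pvAScan_end v (e + 1) (by omega)
  · next hc =>
    by_cases hl : e < v.length
    · right
      cases hh : PySem.Chars.isalpha (v.getD e ' ')
      · rfl
      · exact absurd ⟨hl, hh⟩ hc
    · left; omega
termination_by v.length - e
decreasing_by omega

theorem pvSetRange_length (l : List Int) (r : Int) (s e : Nat) :
    (pvSetRange l r s e).length = l.length := by
  rw [pvSetRange]
  split
  · rw [pvSetRange_length]; simp
  · rfl
termination_by e - s
decreasing_by omega

theorem pvSetRange_getD_ge (l : List Int) (r : Int) (s e i : Nat) (h : e ≤ i) :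
    (pvSetRange l r s e).getD i 0 = l.getD i 0 := by
  rw [pvSetRange]
  split
  · next hc =>
    rw [pvSetRange_getD_ge (l.set s r) r (s + 1) e i h]
    simp [List.getD]
    rw [List.getElem?_set_ne (by omega)]
  · rfl
termination_by e - s
decreasing_by omega

theorem pvSetRange_take (l : List Int) (r : Int) (s e : Nat) (hse : s ≤ e) (hel : e ≤ l.length) :
    (pvSetRange l r s e).take e = l.take s ++ List.replicate (e - s) r := by
  rw [pvSetRange]
  split
  · next hc =>
    rw [pvSetRange_take (l.set s r) r (s + 1) e (by omega) (by simpa using hel)]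
    have hs : s < l.length := by omega
    have h1 : (l.set s r).take (s + 1) = l.take s ++ [r] := by
      rw [List.set_eq_take_cons_drop r hs, List.take_append]
      have hlt : (l.take s).length = s := by simp; omega
      rw [List.take_of_length_le (by omega), hlt]
      simp
    rw [h1]
    rw [List.append_assoc]
    congr 1
    have : e - s = (e - (s + 1)) + 1 := by omega
    rw [this, List.replicate_succ]
    rfl
  · next hc =>
    have : s = e := by omega
    subst this
    simp
termination_by e - s
decreasing_by omega

theorem take_eq_append_replicate (l : List Int) (s e : Nat) (hse : s ≤ e) (hel : e ≤ l.length)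
    (hz : ∀ i, s ≤ i → l.getD i 0 = 0) :
    l.take e = l.take s ++ List.replicate (e - s) 0 := by
  induction e with
  | zero =>
    have : s = 0 := by omega
    subst this; simp
  | succ m ih =>
    by_cases hsm : s ≤ m
    · rw [List.take_succ, ih hsm (by omega)]
      have hm : m < l.length := by omega
      have : l[m]? = some 0 := by
        have := hz m hsm
        simp [List.getD, List.getElem?_eq_getElem hm] at this ⊢
        exact this
      rw [this]
      have : m + 1 - s = (m - s) + 1 := by omega
      simp [this, List.replicate_succ']
    · have : s = m + 1 := by omega
      subst this; simp

-- the alpha mask read at any index (default false) = isalpha of the char read with default ' '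
theorem pvAlpha_getD (v : List Char) (j : Nat) :
    (v.map PySem.Chars.isalpha).getD j false = PySem.Chars.isalpha (v.getD j ' ') := by
  by_cases h : j < v.length
  · simp [List.getD, List.getElem?_eq_getElem, h]
  · have h1 : v[j]? = none := by simp; omega
    have h2 : (v.map PySem.Chars.isalpha)[j]? = none := by simp; omega
    simp [List.getD, h1, h2]
    decide

-- recurrence for the forward DP array
theorem pvMkL_getD (bs : List Bool) (p i : Nat) :
    (pvMkL bs p).getD i 0 =
      if bs.getD i false then (if i = 0 then p else (pvMkL bs p).getD (i - 1) 0) + 1 else 0 := by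
  induction bs generalizing p i with
  | nil => simp [pvMkL, List.getD]
  | cons a rest ih =>
    cases i with
    | zero => simp [pvMkL, List.getD]
    | succ j =>
      simp only [pvMkL, List.getD_cons_succ]
      rw [ih (if a then p + 1 else 0) j]
      cases j with
      | zero => simp [pvMkL, List.getD]
      | succ m => simp [pvMkL, List.getD_cons_succ]

-- recurrence for the backward DP array
theorem pvMkR_getD (bs : List Bool) (i : Nat) :
    (pvMkR bs).getD i 0 =
      if bs.getD i false then (pvMkR bs).getD (i + 1) 0 + 1 else 0 := by
  induction bs generalizing i with
  | nil => simp [pvMkR, List.getD]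
  | cons a rest ih =>
    cases i with
    | zero =>
      simp only [pvMkR, List.getD_cons_zero, List.getD_cons_succ]
      cases hr : pvMkR rest with
      | nil => simp [List.getD]
      | cons x xs => simp [List.getD]
    | succ j =>
      simp only [pvMkR, List.getD_cons_succ]
      exact ih j

-- inside an alpha run whose left boundary is s, L[i] = i - s + 1
theorem pvL_run (bs : List Bool) (s : Nat)
    (hleft : s = 0 ∨ bs.getD (s - 1) false = false) :
    ∀ i, s ≤ i → (∀ j, s ≤ j → j ≤ i → bs.getD j false = true) →
      (pvMkL bs 0).getD i 0 = i - s + 1 := by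
  intro i
  induction i with
  | zero =>
    intro hs hrun
    have hs0 : s = 0 := by omega
    rw [pvMkL_getD, hrun 0 (by omega) (le_refl _)]
    simp [hs0]
  | succ m ih =>
    intro hs hrun
    rw [pvMkL_getD, hrun (m + 1) hs (le_refl _), if_pos rfl, if_neg (Nat.succ_ne_zero m)]
    simp only [Nat.add_sub_cancel]
    by_cases hsm : s ≤ m
    · rw [ih hsm (fun j h1 h2 => hrun j h1 (by omega))]
      omega
    · have hse : s = m + 1 := by omega
      have hm : bs.getD m false = false := by
        rcases hleft with h | h
        · omega
        · simpa [hse] using h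
      rw [pvMkL_getD, hm]
      simp [hse]

-- inside an alpha run whose right boundary is e, R[i] = e - i
theorem pvR_run (bs : List Bool) (e : Nat)
    (hright : e = bs.length ∨ bs.getD e false = false) :
    ∀ k i, e = i + k → (∀ j, i ≤ j → j < e → bs.getD j false = true) →
      (pvMkR bs).getD i 0 = k := by
  intro k
  induction k with
  | zero =>
    intro i hk _
    rw [pvMkR_getD]
    rcases hright with h | h
    · have hf : bs.getD i false = false := by
        have hnone : bs[i]? = none := by simp; omega
        simp [List.getD, hnone]
      rw [hf]; simp
    · have hie : i = e := by omega
      rw [hie, h]; simp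
  | succ m ih =>
    intro i hk hrun
    rw [pvMkR_getD, hrun i (le_refl _) (by omega)]
    rw [if_pos rfl, ih (i + 1) (by omega) (fun j h1 h2 => hrun j (by omega) h2)]

theorem pvMapRange'_const (f : Nat → Int) (c : Int) :
    ∀ k s, (∀ i, s ≤ i → i < s + k → f i = c) →
      (List.range' s k).map f = List.replicate k c := by
  intro k
  induction k with
  | zero => intro s _; simp
  | succ m ih =>
    intro s h
    rw [List.range'_succ]
    simp only [List.map_cons, List.replicate_succ]
    rw [h s (le_refl _) (by omega), ih (s + 1) (fun i h1 h2 => h i (by omega) (by omega))]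

theorem pvMain (v : List Char) (start : Nat) (lengths : List Int)
    (hlen : lengths.length = v.length)
    (hz : ∀ i, start ≤ i → lengths.getD i 0 = 0)
    (hleft : PySem.Chars.isalpha (v.getD start ' ') = true →
      start = 0 ∨ PySem.Chars.isalpha (v.getD (start - 1) ' ') = false) :
    pvALoop v lengths start = lengths.take start ++
      (List.range' start (v.length - start)).map
        (pvCell v (v.map PySem.Chars.isalpha) (pvMkL (v.map PySem.Chars.isalpha) 0)
          (pvMkR (v.map PySem.Chars.isalpha))) := by
  set bs := v.map PySem.Chars.isalpha with hbs
  set cell := pvCell v bs (pvMkL bs 0) (pvMkR bs) with hcelldef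
  rw [pvALoop]
  by_cases hs : start < v.length
  · simp only [hs, dif_pos]
    by_cases ha : PySem.Chars.isalpha (v.getD start ' ') = false
    · rw [if_pos ha]
      rw [pvMain v (start + 1) lengths hlen (fun i hi => hz i (by omega)) (fun _ => Or.inr ha)]
      have hr : List.range' start (v.length - start)
          = start :: List.range' (start + 1) (v.length - (start + 1)) := by
        have h4 : v.length - start = (v.length - (start + 1)) + 1 := by omega
        rw [h4, List.range'_succ]
      rw [hr, List.map_cons]
      have hc0 : cell start = 0 := by
        rw [hcelldef]
        unfold pvCell
        rw [pvAlpha_getD, ha]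
        simp
      rw [hc0]
      rw [List.take_add_one]
      have hsome : lengths[start]? = some 0 := by
        have := hz start (le_refl _)
        have hm : start < lengths.length := by omega
        simp [List.getD, List.getElem?_eq_getElem hm] at this ⊢
        exact this
      rw [hsome]
      simp
      intro a _ _
      rfl
    · rw [if_neg ha]
      have ha' : PySem.Chars.isalpha (v.getD start ' ') = true := by
        cases h : PySem.Chars.isalpha (v.getD start ' ') <;> simp_all
      set e := pvAScan v (start + 1) with he
      have h1 : start + 1 ≤ e := pvAScan_le_self v (start + 1)
      have h2 : e ≤ v.length := pvAScan_le_len v (start + 1) (by omega)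
      have hrunA : ∀ j, start ≤ j → j < e → PySem.Chars.isalpha (v.getD j ' ') = true := by
        intro j hj1 hj2
        by_cases hj : j = start
        · subst hj; exact ha'
        · exact pvAScan_alpha v (start + 1) j (by omega) hj2
      have hend : e = v.length ∨ PySem.Chars.isalpha (v.getD e ' ') = false :=
        pvAScan_end v (start + 1) (by omega)
      have hnotalpha_e : ¬ PySem.Chars.isalpha (v.getD e ' ') = true := by
        rcases hend with h | h
        · have hnone : v[e]? = none := by simp; omega
          simp [List.getD, hnone]
          decide
        · rw [h]
          simp
      have hleft' : start = 0 ∨ bs.getD (start - 1) false = false := by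
        rcases hleft ha' with h | h
        · exact Or.inl h
        · exact Or.inr (by rw [pvAlpha_getD]; exact h)
      have hright' : e = bs.length ∨ bs.getD e false = false := by
        rcases hend with h | h
        · exact Or.inl (by simp [hbs, h])
        · exact Or.inr (by rw [pvAlpha_getD]; exact h)
      set c : Int := (if (start == 0 || ! PySem.Chars.isalnum (v.getD (start - 1) ' ')
          || e == v.length || ! PySem.Chars.isalnum (v.getD e ' '))
          then ((e - start : Nat) : Int) else 0) with hc
      have hcell : ∀ i, start ≤ i → i < e → cell i = c := by
        intro i hi1 hi2
        have hbi : bs.getD i false = true := by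
          rw [pvAlpha_getD]; exact hrunA i hi1 hi2
        have hL : (pvMkL bs 0).getD i 0 = i - start + 1 :=
          pvL_run bs start hleft' i hi1
            (fun j hj1 hj2 => by rw [pvAlpha_getD]; exact hrunA j hj1 (by omega))
        have hR : (pvMkR bs).getD i 0 = e - i :=
          pvR_run bs e hright' (e - i) i (by omega)
            (fun j hj1 hj2 => by rw [pvAlpha_getD]; exact hrunA j (by omega) hj2)
        rw [hcelldef]
        unfold pvCell
        simp only [hbi, if_true, hL, hR]
        have e1 : i + 1 - (i - start + 1) = start := by omega
        have e2 : i + (e - i) = e := by omega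
        have e3 : i - start + 1 + (e - i) - 1 = e - start := by omega
        rw [e1, e2, e3, hc]
      have hsplit : (List.range' start (v.length - start)).map cell
          = List.replicate (e - start) c ++ (List.range' e (v.length - e)).map cell := by
        have h4 : v.length - start = (e - start) + (v.length - e) := by omega
        have h5 : start + (e - start) = e := by omega
        rw [h4, ← List.range'_append_1, h5, List.map_append]
        rw [pvMapRange'_const cell c (e - start) start
          (fun i hi1 hi2 => hcell i hi1 (by omega))]
      rw [hsplit]
      by_cases hfix : (start == 0 || ! PySem.Chars.isalnum (v.getD (start - 1) ' ')
          || e == v.length || ! PySem.Chars.isalnum (v.getD e ' ')) = true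
      · have hfixA : ((start == 0 || ! PySem.Chars.isalnum (v.getD (start - 1) ' ')) ||
            (e == v.length || ! PySem.Chars.isalnum (v.getD e ' '))) = true := by
          simp only [Bool.or_assoc] at hfix ⊢; exact hfix
        rw [if_pos hfixA]
        set l' := pvSetRange lengths ((e - start : Nat) : Int) start e with hl'
        rw [pvMain v e l' (by rw [hl', pvSetRange_length]; exact hlen)
          (fun i hi => by rw [hl', pvSetRange_getD_ge _ _ _ _ _ hi]; exact hz i (by omega))
          (fun hae => absurd hae hnotalpha_e)]
        rw [hl', pvSetRange_take lengths _ start e (by omega) (by omega), List.append_assoc]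
        rw [hc, if_pos hfix]
      · have hfixA : ¬ (((start == 0 || ! PySem.Chars.isalnum (v.getD (start - 1) ' ')) ||
            (e == v.length || ! PySem.Chars.isalnum (v.getD e ' '))) = true) := by
          simp only [Bool.or_assoc] at hfix ⊢; exact hfix
        rw [if_neg hfixA]
        rw [pvMain v e lengths hlen (fun i hi => hz i (by omega))
          (fun hae => absurd hae hnotalpha_e)]
        rw [take_eq_append_replicate lengths start e (by omega) (by omega) hz, List.append_assoc]
        rw [hc, if_neg hfix]
  · simp only [hs, dif_neg, not_false_iff]
    have h4 : v.length - start = 0 := by omega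
    rw [h4]
    simp only [List.range'_zero, List.map_nil, List.append_nil]
    rw [List.take_of_length_le (by omega)]
termination_by v.length - start
decreasing_by
  all_goals first
    | omega
    | (have := pvAScan_le_self v (start + 1); omega)

-- ===== VERDICT (by name: the statement is the Claim_ definition above) =====
theorem build_alpha_run_lengths_py_spec : Claim_equal_build_alpha_run_lengths_py := by
  intro value _
  unfold Spec_build_alpha_run_lengths_py build_alpha_run_lengths_py build_alpha_run_lengths_py_alt
  simp only []
  by_cases hv : value.toList = []
  · rw [if_pos hv, hv]; simp
  · rw [if_neg hv]
    rw [pvMain value.toList 0 (List.replicate value.toList.length 0) (by simp)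
      (fun i _ => by simp [List.getD, List.getElem?_replicate]; split <;> rfl)
      (fun _ => Or.inl rfl)]
    simp [List.range_eq_range']
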